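-- pv_equiv track=rewrite | github.com/MbuguaOwen/cot_positioning_dashboard | cot_bias/reporting.py | _primary_blocked_by
-- ===== SOURCE A (Python) =====
-- from typing import Any, Dict, Iterable, List, Optional, Sequence, Tuple
--
-- def _primary_blocked_by(reasons: Sequence[str]) -> Optional[str]:
--     priority = [
--         "direction_fail",
--         "spread_fail",
--         "flow_fail",
--         "flow_accel_fail",
--         "crowded_block",
--         "crowded_override_fail",
--         "macro_block",
--         "macro_misaligned",
--         "macro_reversal_fail",
--         "news_blackout_block",
--         "score_gate_fail",
--         "no_report_released_yet",
--     ]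
--     for key in priority:
--         if key in reasons:
--             return key
--     return None
-- ===== SOURCE B (Python) =====
-- _PRIORITY = [
--     "direction_fail",
--     "spread_fail",
--     "flow_fail",
--     "flow_accel_fail",
--     "crowded_block",
--     "crowded_override_fail",
--     "macro_block",
--     "macro_misaligned",
--     "macro_reversal_fail",
--     "news_blackout_block",
--     "score_gate_fail",
--     "no_report_released_yet",
-- ]
-- _RANK = {key: i for i, key in enumerate(_PRIORITY)}
--
--
-- def _primary_blocked_by(reasons):
--     best = None  # (rank, key) with the smallest rank seen so far
--     for r in reasons:
--         i = _RANK.get(r)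
--         if i is not None and (best is None or i < best[0]):
--             best = (i, r)
--     return None if best is None else best[1]
-- ===== Notes on version B (the rewrite author's own statement) =====
-- stated objective: faster
-- what changed: Instead of scanning the fixed priority list and early-returning on the first key contained in reasons (each 'in' a linear scan of reasons), B builds a rank dict once and makes a single pass over reasons, keeping the entry with the smallest rank.
import Mathlib
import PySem

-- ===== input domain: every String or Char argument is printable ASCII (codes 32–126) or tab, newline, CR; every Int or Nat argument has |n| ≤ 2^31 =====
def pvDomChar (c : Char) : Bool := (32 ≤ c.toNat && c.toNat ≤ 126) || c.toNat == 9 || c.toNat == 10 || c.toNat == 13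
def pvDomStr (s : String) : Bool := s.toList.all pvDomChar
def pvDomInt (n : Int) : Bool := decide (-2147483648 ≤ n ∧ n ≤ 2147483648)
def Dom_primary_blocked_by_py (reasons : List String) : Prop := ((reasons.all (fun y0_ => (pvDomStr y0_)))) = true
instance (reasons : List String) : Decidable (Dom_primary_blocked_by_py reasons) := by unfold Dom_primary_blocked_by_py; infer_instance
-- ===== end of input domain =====

-- B replaces A's early-return scan of the fixed priority list (a membership scan of
-- `reasons` per key) by one pass over `reasons` keeping the entry of smallest rank in a
-- precomputed rank dict (one pass over reasons instead of a membership scan per key).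


-- ===== PORT A =====
-- the literal `priority` list of A
def pvPriority : List String :=
  [ "direction_fail", "spread_fail", "flow_fail", "flow_accel_fail", "crowded_block",
    "crowded_override_fail", "macro_block", "macro_misaligned", "macro_reversal_fail",
    "news_blackout_block", "score_gate_fail", "no_report_released_yet" ]

-- A's `for key in priority: if key in reasons: return key` loop with early return
def pvScanA : List String → List String → Option String
  | [], _ => none
  | k :: ks, reasons => if reasons.contains k then some k else pvScanA ks reasons

def primary_blocked_by_py (reasons : List String) : Option String :=
  pvScanA pvPriority reasons

-- ===== PORT B =====
-- B's module-level `_RANK = {key: i for i, key in enumerate(_PRIORITY)}`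
def pvRank : PySem.Dict String Int :=
  (PySem.List.enumerate pvPriority).foldl (fun d p => d.insert p.2 p.1) PySem.Dict.empty

-- one iteration of B's loop: keep the (rank, key) pair of smallest rank seen so far
def pvStep (best : Option (Int × String)) (r : String) : Option (Int × String) :=
  match pvRank.get? r with
  | none => best
  | some i =>
      match best with
      | none => some (i, r)
      | some b => if i < b.1 then some (i, r) else best

def primary_blocked_by_py_alt (reasons : List String) : Option String :=
  match reasons.foldl pvStep none with
  | none => none
  | some b => some b.2

-- ===== PRECONDITION & SPEC =====
def Spec_primary_blocked_by_py (reasons : List String) (out : Option String) : Prop := out = primary_blocked_by_py_alt reasons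
instance (reasons : List String) (out : Option String) : Decidable (Spec_primary_blocked_by_py reasons out) := by unfold Spec_primary_blocked_by_py; infer_instance

-- ===== CLAIM (what is proved, stated in full; the proofs are below) =====
def Claim_equal_primary_blocked_by_py : Prop := ∀ (reasons : List String), Dom_primary_blocked_by_py reasons → Spec_primary_blocked_by_py reasons (primary_blocked_by_py reasons)

-- ===== LEMMAS AND PROOFS =====

-- the rank dict, evaluated
set_option maxHeartbeats 1000000 in
theorem pvRank_eq : pvRank = PySem.Dict.mk
      [("direction_fail", (0:Int)), ("spread_fail", 1), ("flow_fail", 2), ("flow_accel_fail", 3),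
       ("crowded_block", 4), ("crowded_override_fail", 5), ("macro_block", 6),
       ("macro_misaligned", 7), ("macro_reversal_fail", 8), ("news_blackout_block", 9),
       ("score_gate_fail", 10), ("no_report_released_yet", 11)] := by decide

-- every priority key has its own index as rank
set_option maxHeartbeats 1000000 in
theorem pvRank_of_priority : ∀ j : Fin pvPriority.length,
    pvRank.get? pvPriority[j] = some (j.val : Int) := by decide

-- every priority key has a rank
set_option maxHeartbeats 1000000 in
theorem pvRank_priority_isSome : ∀ k ∈ pvPriority, (pvRank.get? k).isSome = true := by decide

-- a rank identifies its key: rank i belongs to priority[i]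
set_option maxHeartbeats 2000000 in
theorem pvRank_sound (r : String) (i : Int) (h : pvRank.get? r = some i) :
    0 ≤ i ∧ ∃ hl : i.toNat < pvPriority.length, pvPriority[i.toNat] = r := by
  rw [pvRank_eq] at h
  simp only [PySem.Dict.get?_mk_cons, beq_iff_eq] at h
  repeat' split at h
  all_goals cases h
  all_goals rename_i heq; subst heq; decide

-- fold with a non-none accumulator = fold from none, combined with the accumulator
def pvChoose (a : Int × String) : Option (Int × String) → Option (Int × String)
  | none => some a
  | some b => if b.1 < a.1 then some b else some a

theorem pvChoose_ne_none (a : Int × String) (o : Option (Int × String)) :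
    pvChoose a o ≠ none := by
  cases o with
  | none => simp [pvChoose]
  | some b => simp only [pvChoose]; split_ifs <;> simp

theorem pvChoose_absorb_lt (a c : Int × String) (o : Option (Int × String)) (h : c.1 < a.1) :
    pvChoose a (pvChoose c o) = pvChoose c o := by
  cases o with
  | none => simp only [pvChoose]; rw [if_pos h]
  | some b =>
      simp only [pvChoose]
      split_ifs with h1 <;> (simp only [pvChoose]; split_ifs <;>
        first | rfl | (exfalso; omega))

theorem pvChoose_absorb_ge (a c : Int × String) (o : Option (Int × String)) (h : ¬ c.1 < a.1) :
    pvChoose a (pvChoose c o) = pvChoose a o := by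
  cases o with
  | none => simp only [pvChoose]; rw [if_neg h]
  | some b =>
      simp only [pvChoose]
      split_ifs with h1 <;> (simp only [pvChoose]; split_ifs <;>
        first | rfl | (exfalso; omega))

theorem foldl_pvStep_some (rs : List String) (a : Int × String) :
    rs.foldl pvStep (some a) = pvChoose a (rs.foldl pvStep none) := by
  induction rs generalizing a with
  | nil => rfl
  | cons r rs ih =>
    simp only [List.foldl_cons]
    cases hr : pvRank.get? r with
    | none =>
        have e1 : pvStep (some a) r = some a := by simp [pvStep, hr]
        have e2 : pvStep none r = none := by simp [pvStep, hr]
        rw [e1, e2, ih]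
    | some i =>
        have e2 : pvStep none r = some (i, r) := by simp [pvStep, hr]
        have e1 : pvStep (some a) r = if i < a.1 then some (i, r) else some a := by
          simp [pvStep, hr]
        rw [e2, e1, ih (i, r)]
        split_ifs with hlt
        · rw [ih (i, r), pvChoose_absorb_lt a (i, r) _ hlt]
        · rw [ih a, pvChoose_absorb_ge a (i, r) _ hlt]

-- when the fold yields nothing, no element of rs has a rank
theorem foldl_pvStep_none (rs : List String) (h : rs.foldl pvStep none = none) :
    ∀ r ∈ rs, pvRank.get? r = none := by
  induction rs with
  | nil => intro r hr; cases hr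
  | cons r rs ih =>
    intro x hx
    simp only [List.foldl_cons] at h
    cases hr : pvRank.get? r with
    | some i =>
        exfalso
        rw [show pvStep none r = some (i, r) by simp [pvStep, hr],
            foldl_pvStep_some] at h
        exact pvChoose_ne_none _ _ h
    | none =>
        rw [show pvStep none r = none by simp [pvStep, hr]] at h
        rcases List.mem_cons.mp hx with rfl | hx
        · exact hr
        · exact ih h x hx

-- when the fold yields some (i, k): k ∈ rs has rank i, and i is minimal among ranks in rs
theorem foldl_pvStep_spec (rs : List String) (i : Int) (k : String)
    (h : rs.foldl pvStep none = some (i, k)) :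
    pvRank.get? k = some i ∧ k ∈ rs ∧
      ∀ r ∈ rs, ∀ j, pvRank.get? r = some j → i ≤ j := by
  induction rs generalizing i k with
  | nil => cases h
  | cons r rs ih =>
    simp only [List.foldl_cons] at h
    cases hr : pvRank.get? r with
    | none =>
        rw [show pvStep none r = none by simp [pvStep, hr]] at h
        obtain ⟨h1, h2, h3⟩ := ih i k h
        refine ⟨h1, List.mem_cons_of_mem _ h2, ?_⟩
        intro x hx j hj
        rcases List.mem_cons.mp hx with rfl | hx
        · rw [hr] at hj; cases hj
        · exact h3 x hx j hj
    | some ir =>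
        rw [show pvStep none r = some (ir, r) by simp [pvStep, hr],
            foldl_pvStep_some] at h
        cases hb : rs.foldl pvStep none with
        | none =>
            rw [hb] at h; simp only [pvChoose, Option.some.injEq, Prod.mk.injEq] at h
            obtain ⟨rfl, rfl⟩ := h
            refine ⟨hr, List.mem_cons_self, ?_⟩
            intro x hx j hj
            rcases List.mem_cons.mp hx with rfl | hx
            · rw [hr] at hj; simp only [Option.some.injEq] at hj; omega
            · rw [foldl_pvStep_none rs hb x hx] at hj; cases hj
        | some b =>
            rw [hb] at h; simp only [pvChoose] at h
            obtain ⟨hb1, hb2, hb3⟩ := ih b.1 b.2 (by rw [hb])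
            split_ifs at h with hlt <;>
              simp only [Option.some.injEq, Prod.mk.injEq] at h
            · obtain ⟨rfl, rfl⟩ := h
              refine ⟨hb1, List.mem_cons_of_mem _ hb2, ?_⟩
              intro x hx j hj
              rcases List.mem_cons.mp hx with rfl | hx
              · rw [hr] at hj; simp only [Option.some.injEq] at hj; omega
              · exact hb3 x hx j hj
            · obtain ⟨rfl, rfl⟩ := h
              refine ⟨hr, List.mem_cons_self, ?_⟩
              intro x hx j hj
              rcases List.mem_cons.mp hx with rfl | hx
              · rw [hr] at hj; simp only [Option.some.injEq] at hj; omega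
              · have := hb3 x hx j hj; omega

-- A's scan is List.find? on the priority list
theorem pvScanA_eq_find? (ks rs : List String) :
    pvScanA ks rs = ks.find? (fun k => rs.contains k) := by
  induction ks with
  | nil => rfl
  | cons k ks ih => simp only [pvScanA, List.find?_cons]; split_ifs with h <;> simp_all

-- ===== VERDICT (by name: the statement is the Claim_ definition above) =====
theorem primary_blocked_by_py_spec : Claim_equal_primary_blocked_by_py := by
  intro reasons _
  unfold Spec_primary_blocked_by_py primary_blocked_by_py primary_blocked_by_py_alt
  rw [pvScanA_eq_find?]
  cases hb : reasons.foldl pvStep none with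
  | none =>
      rw [List.find?_eq_none]
      intro k hk hc
      have hmem : k ∈ reasons := by
        simpa using List.contains_iff_mem.mp (by simpa using hc)
      have := foldl_pvStep_none reasons hb k hmem
      have := pvRank_priority_isSome k hk
      simp_all
  | some b =>
      obtain ⟨h1, h2, h3⟩ := foldl_pvStep_spec reasons b.1 b.2 (by rw [hb])
      obtain ⟨hnn, hl, hget⟩ := pvRank_sound b.2 b.1 h1
      rw [List.find?_eq_some_iff_getElem]
      refine ⟨by simpa [List.contains_iff_mem] using h2, b.1.toNat, hl, hget, ?_⟩
      intro j hj
      simp only [Bool.not_eq_eq_eq_not, Bool.not_true, List.contains_eq_mem,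
        decide_eq_false_iff_not]
      intro hmem
      have hrank := pvRank_of_priority ⟨j, by omega⟩
      have := h3 _ hmem j hrank
      omega
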